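-- pv_equiv track=rewrite | github.com/Leedong-uk/algorithms-in-python | 2025/5월/5월26일/첫번째/PG_전력망둘로나누기.py | solution
-- ===== SOURCE A (Python) =====
-- def solution (n,wires) :
--     answer = 0
--     linked_list = [[] for _ in range(n+1)]
--     check = set()
--     temp = [0] * (n+1)
--
--     for i in wires :
--         x,y = i
--         linked_list[x].append(y)
--         linked_list[y].append(x)
--
--
--     def dfs(curr,parent) :
--         cnt = 1
--         check.add(curr)
--
--         for i in linked_list[curr] :
--             if i == parent :
--                 continue
--             if i not in check :
--                 cnt +=dfs(i,curr)
--         temp[curr] = cnt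
--         return cnt
--
--     dfs(1,None)
--     answer = min(map(lambda x : abs(n-2*x),temp))
--
--     return answer
-- ===== SOURCE B (Python) =====
-- def solution(n, wires):
--     adj = {}
--     for x, y in wires:
--         adj.setdefault(x, []).append(y)
--         adj.setdefault(y, []).append(x)
--     visited = set()
--
--     def walk(curr, parent):
--         visited.add(curr)
--         size = 1
--         best = None
--         for nb in adj.get(curr, []):
--             if nb != parent and nb not in visited:
--                 s, b = walk(nb, curr)
--                 size += s
--                 best = b if best is None else min(best, b)
--         m = abs(n - 2 * size)
--         best = m if best is None else min(best, m)
--         return size, best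
--
--     return walk(1, None)[1]
-- ===== Notes on version B (the rewrite author's own statement) =====
-- stated objective: simpler
-- what changed: B keeps a single DFS but replaces A's preallocated (n+1)-slot adjacency and temp arrays and the final min pass over the whole temp array with a dict adjacency keyed by node label and a running best value folded up through the recursion's return values.
-- outside the precondition, e.g. on solution(2, [[1, -1], [-1, 2]]): A returns 2, B returns 0
import Mathlib
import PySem

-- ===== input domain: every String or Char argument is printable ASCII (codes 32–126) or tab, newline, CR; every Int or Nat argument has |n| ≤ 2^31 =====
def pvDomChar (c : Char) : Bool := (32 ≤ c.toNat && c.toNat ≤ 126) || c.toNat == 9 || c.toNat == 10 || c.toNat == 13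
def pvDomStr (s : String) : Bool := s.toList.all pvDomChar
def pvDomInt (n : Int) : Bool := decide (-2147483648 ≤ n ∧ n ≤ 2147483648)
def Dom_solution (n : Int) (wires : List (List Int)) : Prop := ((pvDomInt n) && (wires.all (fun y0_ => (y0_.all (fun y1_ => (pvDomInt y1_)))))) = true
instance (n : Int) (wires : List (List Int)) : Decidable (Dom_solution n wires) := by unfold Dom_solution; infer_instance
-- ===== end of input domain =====

-- B replaces A's preallocated (n+1)-slot lists and the final min-over-the-whole-temp-array pass by a
-- dict adjacency keyed by node label and a best value folded during the traversal itself (objective: simpler).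

-- ===== PORT A =====

-- linked_list build: for i in wires: x,y = i; linked_list[x].append(y); linked_list[y].append(x)
def pvAdjA (n : Int) (wires : List (List Int)) : List (List Int) :=
  wires.foldl (fun adj w =>
    match w with
    | [x, y] =>
      let adj := PySem.List.pySetD adj x (PySem.List.pyGetD adj x [] ++ [y])
      PySem.List.pySetD adj y (PySem.List.pyGetD adj y [] ++ [x])
    | _ => adj)  -- 'x,y = i' raises ValueError here; outside Pre_
    (List.replicate (n + 1).toNat [])

-- def dfs(curr,parent), mutating check (a set) and temp (a list); fuel bounds the recursion depth
-- (the Python recursion always terminates on Pre_ inputs; fuel n+2 exceeds the visit count there).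
mutual
def pvDfsA (adj : List (List Int)) : Nat → Int → Option Int → PySem.Set Int → List Int → Int × PySem.Set Int × List Int
  | 0, _, _, check, temp => (0, check, temp)
  | fuel + 1, curr, parent, check, temp =>
    let check := PySem.Set.add check curr
    let r := pvDfsALoop adj fuel (PySem.List.pyGetD adj curr []) curr parent 1 check temp
    (r.1, r.2.1, PySem.List.pySetD r.2.2 curr r.1)
termination_by fuel _ _ _ _ => (fuel, 0)
def pvDfsALoop (adj : List (List Int)) (fuel : Nat) : List Int → Int → Option Int → Int → PySem.Set Int → List Int → Int × PySem.Set Int × List Int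
  | [], _, _, cnt, check, temp => (cnt, check, temp)
  | i :: rest, curr, parent, cnt, check, temp =>
    if some i = parent then pvDfsALoop adj fuel rest curr parent cnt check temp
    else if PySem.Set.contains check i then pvDfsALoop adj fuel rest curr parent cnt check temp
    else
      let r := pvDfsA adj fuel i (some curr) check temp
      pvDfsALoop adj fuel rest curr parent (cnt + r.1) r.2.1 r.2.2
termination_by neigh _ _ _ _ _ => (fuel, neigh.length + 1)
end

def solution (n : Int) (wires : List (List Int)) : Int :=
  let linked := pvAdjA n wires
  let temp0 : List Int := List.replicate (n + 1).toNat 0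
  let r := pvDfsA linked ((n + 2).toNat + 2 * wires.length + 2) 1 none PySem.Set.empty temp0
  (PySem.List.min? (r.2.2.map (fun x => ((n - 2 * x).natAbs : Int))) (fun x => x)).getD 0

-- ===== PORT B =====

-- adj = {}; adj.setdefault(x, []).append(y); adj.setdefault(y, []).append(x)
def pvAdjB (wires : List (List Int)) : PySem.Dict Int (List Int) :=
  wires.foldl (fun d w =>
    match w with
    | [x, y] => (d.modify x [] (· ++ [y])).modify y [] (· ++ [x])
    | _ => d)
    PySem.Dict.empty

-- best = b if best is None else min(best, b)
def pvBestFold (best : Option Int) (b : Int) : Option Int :=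
  some (match best with | none => b | some v => min v b)

-- def walk(curr,parent): returns (size, best); fuel = recursion-depth bound (enough on Pre_ inputs)
mutual
def pvWalkB (adj : PySem.Dict Int (List Int)) (n : Int) : Nat → Int → Option Int → PySem.Set Int → Int × Option Int × PySem.Set Int
  | 0, _, _, vis => (0, none, vis)
  | fuel + 1, curr, parent, vis =>
    let vis := PySem.Set.add vis curr
    let r := pvWalkBLoop adj n fuel (adj.getD curr []) curr parent 1 none vis
    (r.1, pvBestFold r.2.1 ((n - 2 * r.1).natAbs : Int), r.2.2)
termination_by fuel _ _ _ => (fuel, 0)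
def pvWalkBLoop (adj : PySem.Dict Int (List Int)) (n : Int) (fuel : Nat) : List Int → Int → Option Int → Int → Option Int → PySem.Set Int → Int × Option Int × PySem.Set Int
  | [], _, _, size, best, vis => (size, best, vis)
  | nb :: rest, curr, parent, size, best, vis =>
    if some nb ≠ parent ∧ ¬ PySem.Set.contains vis nb then
      let r := pvWalkB adj n fuel nb (some curr) vis
      pvWalkBLoop adj n fuel rest curr parent (size + r.1)
        (match r.2.1 with | none => best | some b => pvBestFold best b) r.2.2
    else pvWalkBLoop adj n fuel rest curr parent size best vis
termination_by neigh _ _ _ _ _ => (fuel, neigh.length + 1)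
end

def solution_alt (n : Int) (wires : List (List Int)) : Int :=
  let r := pvWalkB (pvAdjB wires) n ((n + 2).toNat + 2 * wires.length + 2) 1 none PySem.Set.empty
  r.2.1.getD 0

-- ===== PRECONDITION & SPEC =====
-- Pre_ excludes inputs where the Python A raises (n < 1; a wire not of length 2; a label above n or below
-- -(n+1), IndexError), and beyond that only wire lists in which two DISTINCT labels differ by exactly n+1,
-- where Python's negative-index wraparound makes them alias the same slot of A's temp array so A's result
-- is an artefact of that aliasing.
def Pre_solution (n : Int) (wires : List (List Int)) : Prop :=
  1 ≤ n ∧ (∀ w ∈ wires, w.length = 2 ∧ ∀ v ∈ w, -(n + 1) ≤ v ∧ v ≤ n) ∧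
    (1 :: wires.flatten).Pairwise (fun u v => u - v ≠ n + 1 ∧ v - u ≠ n + 1)
instance (n : Int) (wires : List (List Int)) : Decidable (Pre_solution n wires) := by
  unfold Pre_solution; infer_instance

def pvWitness_solution : Int × List (List Int) := (4, [[1, 2], [2, 3], [1, 4]])

def Spec_solution (n : Int) (wires : List (List Int)) (out : Int) : Prop := out = solution_alt n wires
instance (n : Int) (wires : List (List Int)) (out : Int) : Decidable (Spec_solution n wires out) := by unfold Spec_solution; infer_instance

-- ===== CLAIM (what is proved, stated in full; the proofs are below) =====
def Claim_equal_solution : Prop := ∀ (n : Int) (wires : List (List Int)), Dom_solution n wires → Pre_solution n wires → Spec_solution n wires (solution n wires)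


-- ===== LEMMAS AND PROOFS =====

def pvF (n s : Int) : Int := ((n - 2 * s).natAbs : Int)

def pvSetf (t : List Int) (p : Int × Int) : List Int := PySem.List.pySetD t p.1 p.2

def pvOfold (n : Int) (l : List (Int × Int)) : Option Int :=
  l.foldl (fun o q => pvBestFold o (pvF n q.2)) none

def pvOmin (o b? : Option Int) : Option Int :=
  match b? with | none => o | some b => pvBestFold o b

theorem pvOmin_none_left (x : Option Int) : pvOmin none x = x := by
  cases x <;> rfl

theorem pvOmin_bestFold (o : Option Int) (v : Int) : pvOmin o (some v) = pvBestFold o v := rfl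

theorem pvOmin_shift (o : Option Int) (v : Int) (x : Option Int) :
    pvOmin (pvBestFold o v) x = pvOmin o (pvOmin (some v) x) := by
  cases x with
  | none => rfl
  | some b => cases o with
    | none => rfl
    | some u => simp [pvOmin, pvBestFold, min_assoc]

theorem pvOfold_merge (n : Int) (l : List (Int × Int)) (o : Option Int) :
    l.foldl (fun o q => pvBestFold o (pvF n q.2)) o = pvOmin o (pvOfold n l) := by
  induction l generalizing o with
  | nil => rfl
  | cons q l ih =>
    show (l.foldl _ (pvBestFold o (pvF n q.2))) = _
    rw [ih, pvOmin_shift]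
    congr 1
    show _ = pvOfold n (q :: l)
    have : pvOfold n (q :: l) = l.foldl (fun o q => pvBestFold o (pvF n q.2)) (pvBestFold none (pvF n q.2)) := rfl
    rw [this, ih (pvBestFold none (pvF n q.2))]
    rfl

theorem pvOfold_append (n : Int) (l₁ l₂ : List (Int × Int)) :
    pvOfold n (l₁ ++ l₂) = pvOmin (pvOfold n l₁) (pvOfold n l₂) := by
  rw [pvOfold, List.foldl_append, ← pvOfold, pvOfold_merge]

theorem pvOmin_assoc (a b c : Option Int) :
    pvOmin (pvOmin a b) c = pvOmin a (pvOmin b c) := by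
  cases b with
  | none => rw [pvOmin_none_left]; rfl
  | some v => rw [pvOmin_bestFold, pvOmin_shift]

theorem pvOfold_singleton (n : Int) (p : Int × Int) :
    pvOfold n [p] = some (pvF n p.2) := rfl

-- the invariant tying A's (cnt, check, temp) to B's (size, best, vis): ws is the list of
-- (node, subtree-size) writes A performs, in order; B's best is the min of pvF over them
def PvRel (n : Int) (L : List Int) (check : PySem.Set Int) (temp : List Int) (cnt0 : Int) (best0 : Option Int)
    (ra : Int × PySem.Set Int × List Int) (rb : Int × Option Int × PySem.Set Int)
    (ws : List (Int × Int)) : Prop :=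
  ra.1 = rb.1 ∧ rb.2.2 = ra.2.1 ∧ (∀ x ∈ check, x ∈ ra.2.1) ∧
  ra.2.2 = ws.foldl pvSetf temp ∧
  rb.2.1 = pvOmin best0 (pvOfold n ws) ∧
  (∀ p ∈ ws, p.1 ∈ L ∧ (-(n + 1) ≤ p.1 ∧ p.1 ≤ n) ∧ p.1 ∈ ra.2.1 ∧ p.1 ∉ check) ∧
  (ws.map Prod.fst).Nodup ∧
  (ws ≠ [] → ∃ p ∈ ws, p.2 = 1) ∧
  (ws = [] → ra.1 = cnt0 ∧ ra.2.1 = check ∧ ra.2.2 = temp)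

theorem pvContains_iff (s : PySem.Set Int) (x : Int) :
    PySem.Set.contains s x = true ↔ x ∈ s := by
  simp [PySem.Set.contains]

theorem pvAdd_of_not_mem (s : PySem.Set Int) (x : Int) (h : PySem.Set.contains s x = false) :
    PySem.Set.add s x = s ++ [x] := by
  simp [PySem.Set.add, PySem.Set.contains] at *
  simp [h]

theorem pvMem_setf (t : List Int) (p : Int × Int) (x : Int) (h : x ∈ pvSetf t p) :
    x ∈ t ∨ x = p.2 := by
  unfold pvSetf PySem.List.pySetD PySem.List.pySet? at h
  cases hi : PySem.List.pyIdx? t.length p.1 with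
  | none => simp [hi] at h; exact Or.inl h
  | some k => simp [hi] at h; exact List.mem_or_eq_of_mem_set h

theorem pvBestMatch (best : Option Int) (x : Option Int) :
    (match x with | none => best | some b => pvBestFold best b) = pvOmin best x := by
  cases x <;> rfl

theorem pvLoopStep (n : Int) (L : List Int) (adjA : List (List Int)) (adjB : PySem.Dict Int (List Int)) (fuel : Nat)
    (hP : ∀ (curr : Int) (parent : Option Int) (check : PySem.Set Int) (temp : List Int),
      curr ∈ L → -(n + 1) ≤ curr → curr ≤ n → PySem.Set.contains check curr = false →
      ∃ ws, PvRel n L check temp 0 none (pvDfsA adjA fuel curr parent check temp)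
              (pvWalkB adjB n fuel curr parent check) ws) :
    ∀ (neigh : List Int) (curr : Int) (parent : Option Int) (cnt : Int) (best : Option Int)
      (check : PySem.Set Int) (temp : List Int),
      curr ∈ L → -(n + 1) ≤ curr → curr ≤ n → (∀ u ∈ neigh, u ∈ L ∧ -(n + 1) ≤ u ∧ u ≤ n) →
      ∃ ws, PvRel n L check temp cnt best (pvDfsALoop adjA fuel neigh curr parent cnt check temp)
              (pvWalkBLoop adjB n fuel neigh curr parent cnt best check) ws := by
  intro neigh
  induction neigh with
  | nil =>
    intro curr parent cnt best check temp _ _ _ _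
    simp only [pvDfsALoop, pvWalkBLoop]
    exact ⟨[], rfl, rfl, fun x h => h, rfl, rfl, by simp, by simp, by simp,
      fun _ => ⟨rfl, rfl, rfl⟩⟩
  | cons i rest ih =>
    intro curr parent cnt best check temp hL h0 h1 hne
    have hrest : ∀ u ∈ rest, u ∈ L ∧ -(n + 1) ≤ u ∧ u ≤ n := fun u hu => hne u (by simp [hu])
    by_cases hp : some i = parent
    · have hB : ¬ (some i ≠ parent ∧ ¬ PySem.Set.contains check i = true) := by simp [hp]
      simp only [pvDfsALoop, pvWalkBLoop, if_pos hp, if_neg hB]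
      exact ih curr parent cnt best check temp hL h0 h1 hrest
    · by_cases hm : PySem.Set.contains check i = true
      · have hB : ¬ (some i ≠ parent ∧ ¬ PySem.Set.contains check i = true) := fun h => h.2 hm
        simp only [pvDfsALoop, pvWalkBLoop, if_neg hp, if_pos hm, if_neg hB]
        exact ih curr parent cnt best check temp hL h0 h1 hrest
      · have hmf : PySem.Set.contains check i = false := by
          cases hcc : PySem.Set.contains check i
          · rfl
          · exact absurd hcc hm
        have hB : (some i ≠ parent ∧ ¬ PySem.Set.contains check i = true) := ⟨hp, hm⟩
        simp only [pvDfsALoop, pvWalkBLoop, if_neg hp, if_neg hm, if_pos hB]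
        obtain ⟨hiL, hi0, hi1⟩ := hne i (by simp)
        obtain ⟨wsC, c1, c2, c3, c4, c5, c6, c7, c8, c9⟩ :=
          hP i (some curr) check temp hiL hi0 hi1 hmf
        set rA := pvDfsA adjA fuel i (some curr) check temp with hrA
        set rB := pvWalkB adjB n fuel i (some curr) check with hrB
        rw [pvBestMatch, c5, pvOmin_none_left, ← c1, c2]
        obtain ⟨wsR, r1, r2, r3, r4, r5, r6, r7, r8, r9⟩ :=
          ih curr parent (cnt + rA.1) (pvOmin best (pvOfold n wsC)) rA.2.1 rA.2.2 hL h0 h1 hrest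
        set sA := pvDfsALoop adjA fuel rest curr parent (cnt + rA.1) rA.2.1 rA.2.2
        set sB := pvWalkBLoop adjB n fuel rest curr parent (cnt + rA.1) (pvOmin best (pvOfold n wsC)) rA.2.1
        refine ⟨wsC ++ wsR, r1, r2, ?_, ?_, ?_, ?_, ?_, ?_, ?_⟩
        · exact fun x hx => r3 x (c3 x hx)
        · rw [r4, c4, List.foldl_append]
        · rw [r5, pvOfold_append, pvOmin_assoc]
        · intro p hp'
          rcases List.mem_append.mp hp' with hq | hq
          · obtain ⟨b0, b1, b2, b3⟩ := c6 p hq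
            exact ⟨b0, b1, r3 _ b2, b3⟩
          · obtain ⟨b0, b1, b2, b3⟩ := r6 p hq
            exact ⟨b0, b1, b2, fun hmem => b3 (c3 _ hmem)⟩
        · rw [List.map_append]
          rw [List.nodup_append]
          refine ⟨c7, r7, ?_⟩
          intro a ha b hb
          obtain ⟨pa, hpa, hea⟩ := List.mem_map.mp ha
          obtain ⟨pb, hpb, heb⟩ := List.mem_map.mp hb
          intro he
          apply (r6 pb hpb).2.2.2
          rw [heb, ← he, ← hea]
          exact (c6 pa hpa).2.2.1
        · intro hws
          cases hC : wsC with
          | nil =>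
            obtain ⟨p, hp2, he⟩ := r8 (by
              intro hR0
              exact hws (by rw [hC, hR0]; rfl))
            exact ⟨p, List.mem_append_right _ hp2, he⟩
          | cons a l =>
            obtain ⟨p, hp2, he⟩ := c8 (by simp [hC])
            exact ⟨p, List.mem_append_left _ (hC ▸ hp2), he⟩
        · intro hnil
          rcases List.append_eq_nil_iff.mp hnil with ⟨hC, hR⟩
          obtain ⟨d1, d2, d3⟩ := c9 hC
          obtain ⟨g1, g2, g3⟩ := r9 hR
          exact ⟨by rw [g1, d1]; ring, by rw [g2, d2], by rw [g3, d3]⟩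

theorem pvNodeStep (n : Int) (L : List Int) (adjA : List (List Int)) (adjB : PySem.Dict Int (List Int)) (fuel : Nat)
    (hadj : ∀ v ∈ L, PySem.List.pyGetD adjA v [] = adjB.getD v [])
    (hrange : ∀ v u : Int, u ∈ PySem.List.pyGetD adjA v [] → u ∈ L ∧ -(n + 1) ≤ u ∧ u ≤ n)
    (hQ : ∀ (neigh : List Int) (curr : Int) (parent : Option Int) (cnt : Int) (best : Option Int)
      (check : PySem.Set Int) (temp : List Int),
      curr ∈ L → -(n + 1) ≤ curr → curr ≤ n → (∀ u ∈ neigh, u ∈ L ∧ -(n + 1) ≤ u ∧ u ≤ n) →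
      ∃ ws, PvRel n L check temp cnt best (pvDfsALoop adjA fuel neigh curr parent cnt check temp)
              (pvWalkBLoop adjB n fuel neigh curr parent cnt best check) ws) :
    ∀ (curr : Int) (parent : Option Int) (check : PySem.Set Int) (temp : List Int),
      curr ∈ L → -(n + 1) ≤ curr → curr ≤ n → PySem.Set.contains check curr = false →
      ∃ ws, PvRel n L check temp 0 none (pvDfsA adjA (fuel + 1) curr parent check temp)
              (pvWalkB adjB n (fuel + 1) curr parent check) ws ∧ ws ≠ [] := by
  intro curr parent check temp hL h0 h1 hc
  have hnotmem : curr ∉ check := by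
    intro hmem
    rw [← pvContains_iff] at hmem
    rw [hc] at hmem
    exact Bool.false_ne_true hmem
  have hadd : PySem.Set.add check curr = check ++ [curr] := pvAdd_of_not_mem check curr hc
  simp only [pvDfsA, pvWalkB]
  rw [← hadj curr hL]
  obtain ⟨wsL, c1, c2, c3, c4, c5, c6, c7, c8, c9⟩ :=
    hQ (PySem.List.pyGetD adjA curr []) curr parent 1 none (PySem.Set.add check curr) temp hL h0 h1
      (fun u hu => hrange curr u hu)
  set rL := pvDfsALoop adjA fuel (PySem.List.pyGetD adjA curr []) curr parent 1 (PySem.Set.add check curr) temp with hrL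
  set sL := pvWalkBLoop adjB n fuel (PySem.List.pyGetD adjA curr []) curr parent 1 none (PySem.Set.add check curr) with hsL
  have hcurr_mem1 : curr ∈ PySem.Set.add check curr := by rw [hadd]; simp
  have hcurr_final : curr ∈ rL.2.1 := c3 curr hcurr_mem1
  refine ⟨wsL ++ [(curr, rL.1)], ⟨c1, c2, ?_, ?_, ?_, ?_, ?_, ?_, ?_⟩, by simp⟩
  · exact fun x hx => c3 x (by rw [hadd]; exact List.mem_append_left _ hx)
  · show PySem.List.pySetD rL.2.2 curr rL.1 = _
    rw [List.foldl_append, c4]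
    rfl
  · show pvBestFold sL.2.1 ((n - 2 * sL.1).natAbs : Int) = _
    rw [pvOfold_append, pvOfold_singleton, c5, pvOmin_none_left, pvOmin_none_left,
      pvOmin_bestFold, ← c1]
    rfl
  · intro p hp'
    rcases List.mem_append.mp hp' with hq | hq
    · obtain ⟨b0, b1, b2, b3⟩ := c6 p hq
      exact ⟨b0, b1, b2, fun hmem => b3 (by rw [hadd]; exact List.mem_append_left _ hmem)⟩
    · have hpe : p = (curr, rL.1) := by simpa using hq
      subst hpe
      exact ⟨hL, ⟨h0, h1⟩, hcurr_final, hnotmem⟩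
  · rw [List.map_append, List.nodup_append]
    refine ⟨c7, by simp, ?_⟩
    intro a ha b hb
    obtain ⟨pa, hpa, hea⟩ := List.mem_map.mp ha
    have hb' : b = curr := by simpa using hb
    intro he
    exact (c6 pa hpa).2.2.2 (by rw [hea, he, hb']; exact hcurr_mem1)
  · intro _
    cases hL : wsL with
    | nil =>
      obtain ⟨d1, _, _⟩ := c9 hL
      exact ⟨(curr, rL.1), List.mem_append_right _ (by simp), by rw [d1]⟩
    | cons a l =>
      obtain ⟨p, hp2, he⟩ := c8 (by simp [hL])
      exact ⟨p, List.mem_append_left _ (hL ▸ hp2), he⟩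
  · intro hnil
    simp at hnil

theorem pvMain (n : Int) (L : List Int) (adjA : List (List Int)) (adjB : PySem.Dict Int (List Int))
    (hadj : ∀ v ∈ L, PySem.List.pyGetD adjA v [] = adjB.getD v [])
    (hrange : ∀ v u : Int, u ∈ PySem.List.pyGetD adjA v [] → u ∈ L ∧ -(n + 1) ≤ u ∧ u ≤ n) :
    ∀ fuel : Nat,
    (∀ (curr : Int) (parent : Option Int) (check : PySem.Set Int) (temp : List Int),
      curr ∈ L → -(n + 1) ≤ curr → curr ≤ n → PySem.Set.contains check curr = false →
      ∃ ws, PvRel n L check temp 0 none (pvDfsA adjA fuel curr parent check temp)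
              (pvWalkB adjB n fuel curr parent check) ws ∧ (fuel ≠ 0 → ws ≠ []))
    ∧ (∀ (neigh : List Int) (curr : Int) (parent : Option Int) (cnt : Int) (best : Option Int)
        (check : PySem.Set Int) (temp : List Int),
      curr ∈ L → -(n + 1) ≤ curr → curr ≤ n → (∀ u ∈ neigh, u ∈ L ∧ -(n + 1) ≤ u ∧ u ≤ n) →
      ∃ ws, PvRel n L check temp cnt best (pvDfsALoop adjA fuel neigh curr parent cnt check temp)
              (pvWalkBLoop adjB n fuel neigh curr parent cnt best check) ws) := by
  intro fuel
  induction fuel with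
  | zero =>
    have hP0 : ∀ (curr : Int) (parent : Option Int) (check : PySem.Set Int) (temp : List Int),
        curr ∈ L → -(n + 1) ≤ curr → curr ≤ n → PySem.Set.contains check curr = false →
        ∃ ws, PvRel n L check temp 0 none (pvDfsA adjA 0 curr parent check temp)
                (pvWalkB adjB n 0 curr parent check) ws := by
      intro curr parent check temp _ _ _ _
      simp only [pvDfsA, pvWalkB]
      exact ⟨[], rfl, rfl, fun x h => h, rfl, rfl, by simp, by simp, by simp,
        fun _ => ⟨rfl, rfl, rfl⟩⟩
    exact ⟨fun curr parent check temp a b c d =>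
        ⟨(hP0 curr parent check temp a b c d).choose, (hP0 curr parent check temp a b c d).choose_spec,
          fun h => absurd rfl h⟩,
      pvLoopStep n L adjA adjB 0 hP0⟩
  | succ f ihf =>
    have hP : ∀ (curr : Int) (parent : Option Int) (check : PySem.Set Int) (temp : List Int),
        curr ∈ L → -(n + 1) ≤ curr → curr ≤ n → PySem.Set.contains check curr = false →
        ∃ ws, PvRel n L check temp 0 none (pvDfsA adjA (f + 1) curr parent check temp)
                (pvWalkB adjB n (f + 1) curr parent check) ws ∧ ws ≠ [] :=
      pvNodeStep n L adjA adjB f hadj hrange ihf.2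
    refine ⟨fun curr parent check temp a b c d => ?_, ?_⟩
    · obtain ⟨ws, h1, h2⟩ := hP curr parent check temp a b c d
      exact ⟨ws, h1, fun _ => h2⟩
    · exact pvLoopStep n L adjA adjB (f + 1)
        (fun curr parent check temp a b c d => ⟨(hP curr parent check temp a b c d).choose,
          (hP curr parent check temp a b c d).choose_spec.1⟩)

theorem pvGetD_def (xs : List (List Int)) (i : Int) :
    PySem.List.pyGetD xs i [] = (PySem.List.pyGet? xs i).getD [] := rfl

-- python index resolution for a list of the given length
def pvSlotN (len : Nat) (i : Int) : Nat := (if i < 0 then i + len else i).toNat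

theorem pvIdx_some (len : Nat) (i : Int) (h1 : -(len : Int) ≤ i) (h2 : i < (len : Int)) :
    PySem.List.pyIdx? len i = some (pvSlotN len i) := by
  unfold PySem.List.pyIdx? pvSlotN
  by_cases ha : 0 ≤ i
  · rw [if_pos ha, if_pos h2]
    congr 1
    omega
  · rw [if_neg ha, if_pos h1]
    congr 1
    omega

theorem pvSetD_eq_set {α : Type} (t : List α) (i : Int) (a : α)
    (h1 : -(t.length : Int) ≤ i) (h2 : i < (t.length : Int)) :
    PySem.List.pySetD t i a = t.set (pvSlotN t.length i) a := by
  unfold PySem.List.pySetD PySem.List.pySet?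
  rw [pvIdx_some _ _ h1 h2]
  rfl

theorem pvSlotN_lt (len : Nat) (i : Int) (h1 : -(len : Int) ≤ i) (h2 : i < (len : Int)) :
    pvSlotN len i < len := by
  unfold pvSlotN; split_ifs <;> omega

theorem pvGetD_eq_get {α : Type} (t : List α) (i : Int) (d : α)
    (h1 : -(t.length : Int) ≤ i) (h2 : i < (t.length : Int)) :
    PySem.List.pyGetD t i d = t[pvSlotN t.length i]'(pvSlotN_lt _ _ h1 h2) := by
  unfold PySem.List.pyGetD PySem.List.pyGet?
  rw [pvIdx_some _ _ h1 h2]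
  show (t[pvSlotN t.length i]?).getD d = _
  rw [List.getElem?_eq_getElem (pvSlotN_lt _ _ h1 h2)]
  rfl

theorem pvGetD_setD (t : List (List Int)) (i v : Int) (a : List Int)
    (hi1 : -(t.length : Int) ≤ i) (hi2 : i < (t.length : Int))
    (hv1 : -(t.length : Int) ≤ v) (hv2 : v < (t.length : Int)) :
    PySem.List.pyGetD (PySem.List.pySetD t i a) v []
      = if pvSlotN t.length v = pvSlotN t.length i then a else PySem.List.pyGetD t v [] := by
  rw [pvSetD_eq_set t i a hi1 hi2]
  rw [pvGetD_eq_get _ v [] (by simp only [List.length_set]; exact hv1)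
      (by simp only [List.length_set]; exact hv2)]
  simp only [List.length_set]
  rw [List.getElem_set]
  by_cases h : pvSlotN t.length v = pvSlotN t.length i
  · rw [if_pos h.symm, if_pos h]
  · rw [if_neg (fun he => h he.symm), if_neg h, pvGetD_eq_get t v [] hv1 hv2]

theorem pvMem_setD (t : List (List Int)) (i : Int) (a l : List Int)
    (h1 : -(t.length : Int) ≤ i) (h2 : i < (t.length : Int))
    (hl : l ∈ PySem.List.pySetD t i a) : l ∈ t ∨ l = a := by
  rw [pvSetD_eq_set _ _ _ h1 h2] at hl
  exact List.mem_or_eq_of_mem_set hl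

theorem pvGetD_sub (L : List Int) (n' : Int) (t : List (List Int)) (v : Int) (u : Int)
    (hmem : ∀ l ∈ t, ∀ x ∈ l, (-(n' + 1) ≤ x ∧ x ≤ n') ∧ x ∈ L)
    (hu : u ∈ PySem.List.pyGetD t v []) :
    (-(n' + 1) ≤ u ∧ u ≤ n') ∧ u ∈ L := by
  rw [pvGetD_def] at hu
  cases hg : PySem.List.pyGet? t v with
  | none => rw [hg] at hu; simp at hu
  | some l =>
    rw [hg] at hu
    exact hmem l (PySem.List.mem_of_pyGet?_eq_some _ hg) u hu

theorem pvGetD_replicate (k : Nat) (v : Int) :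
    PySem.List.pyGetD (List.replicate k ([] : List Int)) v [] = [] := by
  rw [pvGetD_def]
  cases hg : PySem.List.pyGet? (List.replicate k ([] : List Int)) v with
  | none => rfl
  | some l =>
    simp only [Option.getD_some]
    exact List.eq_of_mem_replicate (PySem.List.mem_of_pyGet?_eq_some _ hg)

theorem pvAdjFold (n : Int) (hn : 1 ≤ n) (L : List Int)
    (hLb : ∀ v ∈ L, -(n + 1) ≤ v ∧ v ≤ n)
    (hinj : ∀ u ∈ L, ∀ v ∈ L, pvSlotN (n + 1).toNat u = pvSlotN (n + 1).toNat v → u = v) :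
    ∀ (ws : List (List Int)) (tA : List (List Int)) (dB : PySem.Dict Int (List Int)),
    (∀ w ∈ ws, w.length = 2 ∧ ∀ v ∈ w, (-(n + 1) ≤ v ∧ v ≤ n) ∧ v ∈ L) →
    tA.length = (n + 1).toNat →
    (∀ v ∈ L, PySem.List.pyGetD tA v [] = dB.getD v []) →
    (∀ l ∈ tA, ∀ u ∈ l, (-(n + 1) ≤ u ∧ u ≤ n) ∧ u ∈ L) →
    (ws.foldl (fun adj w =>
      match w with
      | [x, y] =>
        let adj := PySem.List.pySetD adj x (PySem.List.pyGetD adj x [] ++ [y])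
        PySem.List.pySetD adj y (PySem.List.pyGetD adj y [] ++ [x])
      | _ => adj) tA).length = (n + 1).toNat ∧
    (∀ v ∈ L,
      PySem.List.pyGetD (ws.foldl (fun adj w =>
        match w with
        | [x, y] =>
          let adj := PySem.List.pySetD adj x (PySem.List.pyGetD adj x [] ++ [y])
          PySem.List.pySetD adj y (PySem.List.pyGetD adj y [] ++ [x])
        | _ => adj) tA) v []
      = (ws.foldl (fun d w =>
        match w with
        | [x, y] => (d.modify x [] (· ++ [y])).modify y [] (· ++ [x])
        | _ => d) dB).getD v []) ∧
    (∀ l ∈ (ws.foldl (fun adj w =>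
        match w with
        | [x, y] =>
          let adj := PySem.List.pySetD adj x (PySem.List.pyGetD adj x [] ++ [y])
          PySem.List.pySetD adj y (PySem.List.pyGetD adj y [] ++ [x])
        | _ => adj) tA), ∀ u ∈ l, (-(n + 1) ≤ u ∧ u ≤ n) ∧ u ∈ L) := by
  intro ws
  induction ws with
  | nil => exact fun tA dB _ h1 h2 h3 => ⟨h1, fun v hv => h2 v hv, h3⟩
  | cons w ws ih =>
    intro tA dB hws hlen hadj hmem
    obtain ⟨hw2, hwb⟩ := hws w (by simp)
    obtain ⟨x, y, rfl⟩ : ∃ x y, w = [x, y] := by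
      cases w with
      | nil => simp at hw2
      | cons x w1 =>
        cases w1 with
        | nil => simp at hw2
        | cons y w2 =>
          cases w2 with
          | nil => exact ⟨x, y, rfl⟩
          | cons z w3 => simp at hw2
    obtain ⟨⟨hx0, hx1⟩, hxL⟩ := hwb x (by simp)
    obtain ⟨⟨hy0, hy1⟩, hyL⟩ := hwb y (by simp)
    have hlenInt : (tA.length : Int) = n + 1 := by rw [hlen]; omega
    have hslot : ∀ u ∈ L, ∀ v ∈ L, pvSlotN tA.length u = pvSlotN tA.length v → u = v := by
      rw [hlen]; exact hinj
    set t1 := PySem.List.pySetD tA x (PySem.List.pyGetD tA x [] ++ [y]) with ht1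
    have hlen1 : t1.length = tA.length := PySem.List.length_pySetD _ _ _
    set t2 := PySem.List.pySetD t1 y (PySem.List.pyGetD t1 y [] ++ [x]) with ht2
    have hlen2 : t2.length = tA.length := by rw [ht2, PySem.List.length_pySetD, hlen1]
    set d1 := dB.modify x ([] : List Int) (· ++ [y]) with hd1
    set d2 := d1.modify y ([] : List Int) (· ++ [x]) with hd2
    have hget1 : ∀ v ∈ L, PySem.List.pyGetD t1 v []
        = if v = x then PySem.List.pyGetD tA x [] ++ [y] else PySem.List.pyGetD tA v [] := by
      intro v hv
      obtain ⟨hv0, hv1⟩ := hLb v hv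
      rw [ht1, pvGetD_setD tA x v _ (by omega) (by omega) (by omega) (by omega)]
      by_cases hvx : v = x
      · rw [if_pos (by rw [hvx]), if_pos hvx]
      · rw [if_neg (fun hs => hvx (hslot v hv x hxL hs)), if_neg hvx]
    have hget2 : ∀ v ∈ L, PySem.List.pyGetD t2 v []
        = if v = y then PySem.List.pyGetD t1 y [] ++ [x] else PySem.List.pyGetD t1 v [] := by
      intro v hv
      obtain ⟨hv0, hv1⟩ := hLb v hv
      rw [ht2, pvGetD_setD t1 y v _ (by rw [hlen1]; omega) (by rw [hlen1]; omega)
        (by rw [hlen1]; omega) (by rw [hlen1]; omega)]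
      rw [hlen1]
      by_cases hvy : v = y
      · rw [if_pos (by rw [hvy]), if_pos hvy]
      · rw [if_neg (fun hs => hvy (hslot v hv y hyL hs)), if_neg hvy]
    have hmem1 : ∀ l ∈ t1, ∀ u ∈ l, (-(n + 1) ≤ u ∧ u ≤ n) ∧ u ∈ L := by
      intro l hl u hu
      rcases pvMem_setD tA x _ l (by omega) (by omega) hl with h | h
      · exact hmem l h u hu
      · rw [h] at hu
        rcases List.mem_append.mp hu with h' | h'
        · exact pvGetD_sub L n tA x u hmem h'
        · simp at h'; subst h'; exact ⟨⟨hy0, hy1⟩, hyL⟩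
    have hmem2 : ∀ l ∈ t2, ∀ u ∈ l, (-(n + 1) ≤ u ∧ u ≤ n) ∧ u ∈ L := by
      intro l hl u hu
      rcases pvMem_setD t1 y _ l (by rw [hlen1]; omega) (by rw [hlen1]; omega) hl with h | h
      · exact hmem1 l h u hu
      · rw [h] at hu
        rcases List.mem_append.mp hu with h' | h'
        · exact pvGetD_sub L n t1 y u hmem1 h'
        · simp at h'; subst h'; exact ⟨⟨hx0, hx1⟩, hxL⟩
    have hadj2 : ∀ v ∈ L, PySem.List.pyGetD t2 v [] = d2.getD v [] := by
      intro v hv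
      rw [hget2 v hv, hd2, PySem.Dict.getD_modify]
      by_cases hvy : v = y
      · rw [if_pos hvy, if_pos hvy, hget1 y hyL, hd1, PySem.Dict.getD_modify]
        by_cases hyx : y = x
        · rw [if_pos hyx, if_pos hyx, hadj x hxL]
        · rw [if_neg hyx, if_neg hyx, hadj y hyL]
      · rw [if_neg hvy, if_neg hvy, hget1 v hv, hd1, PySem.Dict.getD_modify]
        by_cases hvx : v = x
        · rw [if_pos hvx, if_pos hvx, hadj x hxL]
        · rw [if_neg hvx, if_neg hvx, hadj v hv]
    have := ih t2 d2 (fun w hw => hws w (by simp [hw])) (by rw [hlen2, hlen]) hadj2 hmem2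
    simpa using this

-- adjacency-building invariant
theorem pvAdjInv (n : Int) (wires : List (List Int)) (L : List Int) (hn : 1 ≤ n)
    (hLb : ∀ v ∈ L, -(n + 1) ≤ v ∧ v ≤ n)
    (hinj : ∀ u ∈ L, ∀ v ∈ L, pvSlotN (n + 1).toNat u = pvSlotN (n + 1).toNat v → u = v)
    (hw : ∀ w ∈ wires, w.length = 2 ∧ ∀ v ∈ w, (-(n + 1) ≤ v ∧ v ≤ n) ∧ v ∈ L) :
    (pvAdjA n wires).length = (n + 1).toNat ∧
    (∀ v ∈ L, PySem.List.pyGetD (pvAdjA n wires) v [] = (pvAdjB wires).getD v []) ∧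
    (∀ v u : Int, u ∈ PySem.List.pyGetD (pvAdjA n wires) v [] → u ∈ L ∧ -(n + 1) ≤ u ∧ u ≤ n) := by
  have base_len : (List.replicate (n + 1).toNat ([] : List Int)).length = (n + 1).toNat := by simp
  have h := pvAdjFold n hn L hLb hinj wires (List.replicate (n + 1).toNat []) PySem.Dict.empty hw
    base_len
    (by
      intro v _
      rw [PySem.Dict.getD_empty, pvGetD_replicate])
    (by intro l hl u hu; rw [List.eq_of_mem_replicate hl] at hu; simp at hu)
  obtain ⟨hl, he, hm⟩ := h
  refine ⟨hl, he, ?_⟩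
  intro v u hu
  obtain ⟨⟨hb1, hb2⟩, hL⟩ := pvGetD_sub L n (pvAdjA n wires) v u hm hu
  exact ⟨hL, hb1, hb2⟩

theorem pvFoldSet_mem (ws : List (Int × Int)) (temp : List Int) (x : Int)
    (h : x ∈ ws.foldl pvSetf temp) : x ∈ temp ∨ x ∈ ws.map Prod.snd := by
  induction ws generalizing temp with
  | nil => exact Or.inl h
  | cons p ws ih =>
    rcases ih (pvSetf temp p) h with h' | h'
    · rcases pvMem_setf temp p x h' with h'' | h''
      · exact Or.inl h''
      · exact Or.inr (by simp [h''])
    · exact Or.inr (by simp; right; simpa using h')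

theorem pvFoldSet_untouched (ws : List (Int × Int)) (temp : List Int) (j : Nat)
    (hws : ∀ p ∈ ws, (-(temp.length : Int) ≤ p.1 ∧ p.1 < (temp.length : Int)) ∧
      pvSlotN temp.length p.1 ≠ j) :
    (ws.foldl pvSetf temp)[j]? = temp[j]? := by
  induction ws generalizing temp with
  | nil => rfl
  | cons p ws ih =>
    obtain ⟨⟨hb1, hb2⟩, hj⟩ := hws p (by simp)
    have hset : pvSetf temp p = temp.set (pvSlotN temp.length p.1) p.2 :=
      pvSetD_eq_set temp p.1 p.2 hb1 hb2
    have hlen : (pvSetf temp p).length = temp.length := by rw [hset]; simp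
    rw [List.foldl_cons, ih (pvSetf temp p) (fun q hq => by rw [hlen]; exact hws q (by simp [hq])),
      hset, List.getElem?_set_ne hj]

theorem pvFoldSet_values (ws : List (Int × Int)) (temp : List Int)
    (hb : ∀ p ∈ ws, -(temp.length : Int) ≤ p.1 ∧ p.1 < (temp.length : Int))
    (hnd : (ws.map (fun p => pvSlotN temp.length p.1)).Nodup) :
    ∀ p ∈ ws, p.2 ∈ ws.foldl pvSetf temp := by
  induction ws generalizing temp with
  | nil => intro p hp; simp at hp
  | cons q ws ih =>
    intro p hp
    obtain ⟨hq1, hq2⟩ := hb q (by simp)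
    have hset : pvSetf temp q = temp.set (pvSlotN temp.length q.1) q.2 :=
      pvSetD_eq_set temp q.1 q.2 hq1 hq2
    have hlen : (pvSetf temp q).length = temp.length := by rw [hset]; simp
    rw [List.map_cons] at hnd
    obtain ⟨hnotin, hnd'⟩ := List.nodup_cons.mp hnd
    rcases List.mem_cons.mp hp with he | hp'
    · subst he
      have hun : ((ws.foldl pvSetf (pvSetf temp p))[pvSlotN temp.length p.1]?)
          = (pvSetf temp p)[pvSlotN temp.length p.1]? := by
        apply pvFoldSet_untouched
        intro r hr
        refine ⟨by rw [hlen]; exact hb r (by simp [hr]), ?_⟩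
        rw [hlen]
        intro he
        exact hnotin (he ▸ List.mem_map_of_mem hr)
      have hsel : (pvSetf temp p)[pvSlotN temp.length p.1]? = some p.2 := by
        rw [hset, List.getElem?_set_self (pvSlotN_lt _ _ hq1 hq2)]
      rw [List.foldl_cons]
      exact List.mem_of_getElem? (hun.trans hsel)
    · rw [List.foldl_cons]
      exact ih (pvSetf temp q)
        (fun r hr => by rw [hlen]; exact hb r (by simp [hr]))
        (by rw [hlen]; exact hnd') p hp'

theorem pvFoldlMin (t : List Int) (c : Int) :
    t.foldl min c ∈ c :: t ∧ ∀ x ∈ c :: t, t.foldl min c ≤ x := by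
  induction t generalizing c with
  | nil => exact ⟨by simp, by simp⟩
  | cons a t ih =>
    obtain ⟨hm, hbnd⟩ := ih (min c a)
    constructor
    · rw [List.foldl_cons]
      rcases List.mem_cons.mp hm with he | ht
      · rcases min_choice c a with h | h <;> rw [he, h] <;> simp
      · simp [ht]
    · intro x hx
      rw [List.foldl_cons]
      have h1 : List.foldl min (min c a) t ≤ min c a := hbnd (min c a) (by simp)
      rcases List.mem_cons.mp hx with rfl | hx'
      · exact le_trans h1 (min_le_left _ _)
      · rcases List.mem_cons.mp hx' with rfl | hx''
        · exact le_trans h1 (min_le_right _ _)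
        · exact hbnd _ (by simp [hx''])

theorem pvMinChar (l : List Int) (m : Int) (hm : m ∈ l) (hb : ∀ x ∈ l, m ≤ x) :
    PySem.List.min? l (fun x => x) = some m := by
  cases l with
  | nil => simp at hm
  | cons c t =>
    rw [PySem.List.min?_id_cons]
    obtain ⟨hmem, hbnd⟩ := pvFoldlMin t c
    exact congrArg some (le_antisymm (hbnd m hm) (hb _ hmem))

theorem pvOfold_some (n : Int) (l : List (Int × Int)) (c : Int) :
    l.foldl (fun o q => pvBestFold o (pvF n q.2)) (some c)
      = some ((l.map (fun q => pvF n q.2)).foldl min c) := by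
  induction l generalizing c with
  | nil => rfl
  | cons q l ih => rw [List.foldl_cons, show pvBestFold (some c) (pvF n q.2) = some (min c (pvF n q.2)) from rfl, ih]; rfl

theorem pvOfoldChar (n : Int) (ws : List (Int × Int)) (hne : ws ≠ []) :
    ∃ bv, pvOfold n ws = some bv ∧ (∃ p ∈ ws, bv = pvF n p.2) ∧ (∀ p ∈ ws, bv ≤ pvF n p.2) := by
  cases ws with
  | nil => exact absurd rfl hne
  | cons q l =>
    have h1 : pvOfold n (q :: l) = l.foldl (fun o q => pvBestFold o (pvF n q.2)) (some (pvF n q.2)) := rfl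
    rw [h1, pvOfold_some]
    refine ⟨_, rfl, ?_, ?_⟩
    · obtain ⟨hmem, _⟩ := pvFoldlMin (l.map (fun q => pvF n q.2)) (pvF n q.2)
      rcases List.mem_cons.mp hmem with he | ht
      · exact ⟨q, by simp, he⟩
      · obtain ⟨p, hp, he⟩ := List.mem_map.mp ht
        exact ⟨p, by simp [hp], he.symm⟩
    · intro p hp
      obtain ⟨_, hbnd⟩ := pvFoldlMin (l.map (fun q => pvF n q.2)) (pvF n q.2)
      rcases List.mem_cons.mp hp with rfl | hp'
      · exact hbnd _ (by simp)
      · exact hbnd _ (List.mem_cons_of_mem _ (List.mem_map.mpr ⟨p, hp', rfl⟩))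

-- ===== VERDICT (by name: the statement is the Claim_ definition above) =====
theorem solution_spec : Claim_equal_solution := by
  intro n wires _ hpre
  obtain ⟨hn, hw, hpw⟩ := hpre
  have hLb : ∀ v ∈ (1 : Int) :: wires.flatten, -(n + 1) ≤ v ∧ v ≤ n := by
    intro v hv
    rcases List.mem_cons.mp hv with rfl | hv'
    · omega
    · obtain ⟨w, hwmem, hvw⟩ := List.mem_flatten.mp hv'
      exact (hw w hwmem).2 v hvw
  have hsym : Symmetric (fun u v : Int => u - v ≠ n + 1 ∧ v - u ≠ n + 1) :=
    fun u v h => ⟨h.2, h.1⟩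
  have hinj : ∀ u ∈ (1 : Int) :: wires.flatten, ∀ v ∈ (1 : Int) :: wires.flatten,
      pvSlotN (n + 1).toNat u = pvSlotN (n + 1).toNat v → u = v := by
    intro u hu v hv he
    by_contra hne
    obtain ⟨d1, d2⟩ := hpw.forall hsym hu hv hne
    obtain ⟨hu1, hu2⟩ := hLb u hu
    obtain ⟨hv1, hv2⟩ := hLb v hv
    unfold pvSlotN at he
    split_ifs at he <;> omega
  have hwL : ∀ w ∈ wires, w.length = 2 ∧
      ∀ v ∈ w, (-(n + 1) ≤ v ∧ v ≤ n) ∧ v ∈ (1 : Int) :: wires.flatten := by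
    intro w hwm
    refine ⟨(hw w hwm).1, fun v hv => ⟨(hw w hwm).2 v hv, ?_⟩⟩
    exact List.mem_cons_of_mem _ (List.mem_flatten.mpr ⟨w, hwm, hv⟩)
  obtain ⟨hlenA, hadj, hrange⟩ := pvAdjInv n wires ((1 : Int) :: wires.flatten) hn hLb hinj hwL
  show solution n wires = solution_alt n wires
  unfold solution solution_alt
  have hfuel : (n + 2).toNat + 2 * wires.length + 2 ≠ 0 := by omega
  obtain ⟨ws, ⟨e1, e2, e3, e4, e5, e6, e7, e8, e9⟩, hne0⟩ :=
    (pvMain n ((1 : Int) :: wires.flatten) (pvAdjA n wires) (pvAdjB wires) hadj hrange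
      ((n + 2).toNat + 2 * wires.length + 2)).1 1 none
      PySem.Set.empty (List.replicate (n + 1).toNat 0) (by simp) (by omega) hn rfl
  have hwsne := hne0 hfuel
  set temp0 : List Int := List.replicate (n + 1).toNat 0 with htemp0
  have hlen0 : temp0.length = (n + 1).toNat := by simp [htemp0]
  set rA := pvDfsA (pvAdjA n wires) ((n + 2).toNat + 2 * wires.length + 2) 1 none
    PySem.Set.empty temp0 with hrA
  set rB := pvWalkB (pvAdjB wires) n ((n + 2).toNat + 2 * wires.length + 2) 1 none
    PySem.Set.empty with hrB
  obtain ⟨bv, hbv, ⟨p0, hp0, hbve⟩, hbnd⟩ := pvOfoldChar n ws hwsne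
  have hbnds : ∀ p ∈ ws, -(temp0.length : Int) ≤ p.1 ∧ p.1 < (temp0.length : Int) := by
    intro p hp
    obtain ⟨_, ⟨hb1, hb2⟩, _, _⟩ := e6 p hp
    rw [hlen0]
    omega
  have hvals : ∀ p ∈ ws, p.2 ∈ rA.2.2 := by
    rw [e4]
    apply pvFoldSet_values ws temp0 hbnds
    have : ws.map (fun p => pvSlotN temp0.length p.1)
        = (ws.map Prod.fst).map (fun v => pvSlotN temp0.length v) := by
      rw [List.map_map]
      rfl
    rw [this]
    apply List.Nodup.map_on ?_ e7
    intro u hu v hv he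
    obtain ⟨pu, hpu, heu⟩ := List.mem_map.mp hu
    obtain ⟨pv, hpv, hev⟩ := List.mem_map.mp hv
    apply hinj u (by rw [← heu]; exact (e6 pu hpu).1) v (by rw [← hev]; exact (e6 pv hpv).1)
    rw [← hlen0]
    exact he
  have hminA : PySem.List.min? (rA.2.2.map (fun x => ((n - 2 * x).natAbs : Int))) (fun x => x) = some bv := by
    apply pvMinChar
    · exact List.mem_map.mpr ⟨p0.2, hvals p0 hp0, by rw [hbve]; rfl⟩
    · intro z hz
      obtain ⟨x, hx, rfl⟩ := List.mem_map.mp hz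
      rcases pvFoldSet_mem ws temp0 x (e4 ▸ hx) with h | h
      · have hx0 : x = 0 := by
          rcases List.mem_replicate.mp h with ⟨_, h'⟩
          exact h'
        subst hx0
        obtain ⟨p1, hp1, hp1e⟩ := e8 hwsne
        have h1 : bv ≤ pvF n p1.2 := hbnd p1 hp1
        rw [hp1e] at h1
        have h2 : pvF n 1 ≤ ((n - 2 * 0).natAbs : Int) := by
          unfold pvF
          omega
        exact le_trans h1 h2
      · obtain ⟨p1, hp1, hp1e⟩ := List.mem_map.mp h
        have h1 : bv ≤ pvF n p1.2 := hbnd p1 hp1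
        rw [hp1e] at h1
        exact h1
  show (PySem.List.min? (rA.2.2.map (fun x => ((n - 2 * x).natAbs : Int))) (fun x => x)).getD 0
      = rB.2.1.getD 0
  rw [hminA, e5, pvOmin_none_left, hbv]
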